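-- pv_equiv track=rewrite | github.com/aburrell1/mth4320-hangman-ai | scratch.py | letter_list
-- ===== SOURCE A (Python) =====
-- import string
--
-- def letter_list(word):
--     new_l = []
--     lowercase_letters = string.ascii_lowercase
--     for letter in lowercase_letters:
--         if letter in word:
--             new_l.append(1)
--         else:
--             new_l.append(0)
--
--     return new_l
-- ===== SOURCE B (Python) =====
-- def letter_list(word):
--     result = [0] * 26
--     for c in word:
--         i = ord(c) - ord('a')
--         if 0 <= i < 26:
--             result[i] = 1
--     return result
-- ===== Notes on version B (the rewrite author's own statement) =====
-- stated objective: alternative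
-- what changed: Replaces A's gather loop over the 26-letter alphabet (each iteration testing membership across the whole word) by a single scatter pass over the word that sets indicator[ord(c)-97] when the index lies in range; one pass instead of 26 membership scans, though CPython's C-level membership test makes A fast in practice.
import Mathlib
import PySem

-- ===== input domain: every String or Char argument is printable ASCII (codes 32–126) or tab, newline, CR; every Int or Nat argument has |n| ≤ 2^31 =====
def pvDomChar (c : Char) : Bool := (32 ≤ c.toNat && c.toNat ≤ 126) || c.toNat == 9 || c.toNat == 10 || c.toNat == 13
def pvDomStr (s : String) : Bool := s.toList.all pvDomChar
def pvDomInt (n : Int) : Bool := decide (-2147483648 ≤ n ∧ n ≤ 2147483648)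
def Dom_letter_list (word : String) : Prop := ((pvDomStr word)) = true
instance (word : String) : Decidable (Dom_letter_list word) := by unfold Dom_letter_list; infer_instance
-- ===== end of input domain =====

-- B replaces A's gather loop over the alphabet (one 'in'-scan of the word per letter)
-- by a single scatter pass over the word into a 26-slot indicator (objective: alternative algorithm).

-- ===== PORT A =====
-- for letter in string.ascii_lowercase: append 1 if letter in word else 0
-- ('letter in word' with a one-character needle is exactly char membership in the word's characters)
def letter_list (word : String) : List Int :=
  "abcdefghijklmnopqrstuvwxyz".toList.foldl
    (fun new_l letter => new_l ++ [if letter ∈ word.toList then (1 : Int) else 0]) []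


-- ===== PORT B =====
-- B's per-character step: i = ord(c) - 97; if 0 <= i < 26: result[i] = 1
def pvStep (result : List Int) (c : Char) : List Int :=
  if 0 ≤ (c.toNat : Int) - 97 ∧ (c.toNat : Int) - 97 < 26
  then result.set ((c.toNat : Int) - 97).toNat 1 else result

def letter_list_alt (word : String) : List Int :=
  word.toList.foldl pvStep (List.replicate 26 0)

-- ===== PRECONDITION & SPEC =====
def Spec_letter_list (word : String) (out : List Int) : Prop := out = letter_list_alt word
instance (word : String) (out : List Int) : Decidable (Spec_letter_list word out) := by unfold Spec_letter_list; infer_instance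

-- ===== CLAIM (what is proved, stated in full; the proofs are below) =====
def Claim_equal_letter_list : Prop := ∀ (word : String), Dom_letter_list word → Spec_letter_list word (letter_list word)

-- ===== LEMMAS AND PROOFS =====

theorem char_toNat_inj {a b : Char} (h : a.toNat = b.toNat) : a = b := by
  apply Char.ext
  exact UInt32.toNat_inj.mp h

theorem pvStep_length (l : List Int) (c : Char) : (pvStep l c).length = l.length := by
  unfold pvStep
  split <;> simp

theorem foldl_pvStep_length (cs : List Char) (l : List Int) :
    (cs.foldl pvStep l).length = l.length := by
  induction cs generalizing l with
  | nil => rfl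
  | cons c cs ih => simpa [List.foldl, pvStep_length] using ih (pvStep l c)

theorem foldl_pvStep_getD (cs : List Char) (l : List Int) (hl : l.length = 26)
    (i : Nat) (hi : i < 26) :
    (cs.foldl pvStep l).getD i 0 =
      if ∃ c ∈ cs, c.toNat = 97 + i then 1 else l.getD i 0 := by
  induction cs generalizing l with
  | nil => simp
  | cons c cs ih =>
    have hl' : (pvStep l c).length = 26 := by rw [pvStep_length]; exact hl
    rw [List.foldl_cons, ih (pvStep l c) hl']
    by_cases hrest : ∃ d ∈ cs, d.toNat = 97 + i
    · have hcons : ∃ d ∈ c :: cs, d.toNat = 97 + i := by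
        obtain ⟨d, hd, hdn⟩ := hrest
        exact ⟨d, List.mem_cons_of_mem _ hd, hdn⟩
      rw [if_pos hrest, if_pos hcons]
    · rw [if_neg hrest]
      by_cases hc : c.toNat = 97 + i
      · have hhead : ∃ d ∈ c :: cs, d.toNat = 97 + i := ⟨c, List.mem_cons_self, hc⟩
        rw [if_pos hhead]
        unfold pvStep
        have hcond : (0 : Int) ≤ (c.toNat : Int) - 97 ∧ (c.toNat : Int) - 97 < 26 := by
          omega
        rw [if_pos hcond]
        have htn : ((c.toNat : Int) - 97).toNat = i := by omega
        rw [htn]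
        rw [List.getD_eq_getElem _ _ (by simp [hl]; omega)]
        simp
      · have hnone : ¬ ∃ d ∈ c :: cs, d.toNat = 97 + i := by
          rintro ⟨d, hd, hdn⟩
          rcases List.mem_cons.mp hd with rfl | hd'
          · exact hc hdn
          · exact hrest ⟨d, hd', hdn⟩
        rw [if_neg hnone]
        unfold pvStep
        split
        · next hcond =>
          have hne : ((c.toNat : Int) - 97).toNat ≠ i := by omega
          rw [List.getD_eq_getElem?_getD, List.getD_eq_getElem?_getD,
              List.getElem?_set_ne hne]
        · rfl

def pvAlph : List Char := "abcdefghijklmnopqrstuvwxyz".toList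

theorem pvAlph_get? (i : Nat) (hi : i < 26) :
    (pvAlph[i]?).map Char.toNat = some (97 + i) := by
  interval_cases i <;> decide

theorem pvAlph_toNat (i : Nat) (h : i < pvAlph.length) (hi : i < 26) :
    (pvAlph[i]'h).toNat = 97 + i := by
  have := pvAlph_get? i hi
  rw [List.getElem?_eq_getElem h] at this
  simpa using this

theorem letter_list_eq_map (word : String) :
    letter_list word = pvAlph.map (fun c => if c ∈ word.toList then (1 : Int) else 0) := by
  unfold letter_list pvAlph
  rw [PySem.List.foldl_append_singleton_eq_map, List.nil_append]

theorem letter_list_spec : Claim_equal_letter_list := by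
  intro word _
  unfold Spec_letter_list
  rw [letter_list_eq_map]
  unfold letter_list_alt
  apply List.ext_getElem
  · rw [foldl_pvStep_length]
    simp [pvAlph]
  · intro i h1 h2
    have hi : i < 26 := by
      have := h1
      simpa [pvAlph] using this
    have hp : i < pvAlph.length := by simpa [pvAlph] using hi
    rw [← List.getD_eq_getElem _ 0 h2,
        foldl_pvStep_getD word.toList _ (by simp) i hi]
    rw [List.getElem_map]
    have hmem : pvAlph[i]'hp ∈ word.toList ↔
        ∃ c ∈ word.toList, c.toNat = 97 + i := by
      constructor
      · intro h
        exact ⟨_, h, pvAlph_toNat i hp hi⟩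
      · rintro ⟨c, hc, hcn⟩
        have : c = pvAlph[i]'hp := by
          apply char_toNat_inj
          rw [hcn, pvAlph_toNat i hp hi]
        rwa [← this]
    by_cases hm : ∃ c ∈ word.toList, c.toNat = 97 + i
    · simp [hm, hmem.mpr hm]
    · rw [if_neg hm, if_neg (fun h => hm (hmem.mp h)), List.getD_replicate (0 : Int) hi]
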